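-- pv_equiv track=rewrite | github.com/khanel/TDG | RLOrchestrator/tsp/solvers/hybrid.py | _repair_child
-- ===== SOURCE A (Python) =====
-- from typing import Iterable, List, Tuple
--
-- def _repair_child(child: List[int], fallback: List[int]) -> List[int]:
--     missing = [city for city in fallback if city not in child]
--     out = child[:]
--     idx = 1
--     for city in missing:
--         while idx < len(out) and out[idx] is not None:
--             idx += 1
--         if idx >= len(out):
--             break
--         out[idx] = city
--     return [c if c is not None else fallback[0] for c in out]
-- ===== SOURCE B (Python) =====
-- def _repair_child(child, fallback):
--     # Single forward pass: build the repaired tour front-to-back, consuming the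
--     # missing cities as a queue; position 0 is never filled.
--     missing = [city for city in fallback if city not in child]
--     out = []
--     for i, c in enumerate(child):
--         if c is None and i != 0 and missing:
--             out.append(missing.pop(0))
--         else:
--             out.append(c)
--     return [c if c is not None else fallback[0] for c in out]
-- ===== Notes on version B (the rewrite author's own statement) =====
-- stated objective: simpler
-- what changed: Replaces A's in-place copy filled via a forward-scanning while-pointer (advance idx past non-empty slots, break when it runs off the end) by a single front-to-back pass over enumerate(child) that builds the output directly, consuming the missing cities as a queue.
import Mathlib
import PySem

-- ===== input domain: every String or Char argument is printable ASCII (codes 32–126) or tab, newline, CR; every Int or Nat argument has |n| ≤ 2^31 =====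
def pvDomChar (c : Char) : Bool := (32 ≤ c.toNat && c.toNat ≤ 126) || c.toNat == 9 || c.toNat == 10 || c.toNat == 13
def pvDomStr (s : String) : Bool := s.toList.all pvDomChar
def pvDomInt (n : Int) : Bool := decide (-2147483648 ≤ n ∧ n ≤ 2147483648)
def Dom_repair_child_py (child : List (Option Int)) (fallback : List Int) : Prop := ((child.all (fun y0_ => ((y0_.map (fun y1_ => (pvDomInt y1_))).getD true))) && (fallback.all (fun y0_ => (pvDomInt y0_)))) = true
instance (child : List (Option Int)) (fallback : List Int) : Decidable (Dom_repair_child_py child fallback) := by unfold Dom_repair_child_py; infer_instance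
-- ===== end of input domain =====

-- B builds the repaired tour in one front-to-back pass consuming a queue, instead of A's
-- while-pointer fill of an in-place copy; same return value on all inputs where A returns.

-- ===== PORT A =====
-- `while idx < len(out) and out[idx] is not None: idx += 1`
def pvAdvance (out : List (Option Int)) (idx : Nat) : Nat :=
  if h : idx < out.length ∧ out.getD idx none ≠ none then pvAdvance out (idx + 1) else idx
termination_by out.length - idx
decreasing_by obtain ⟨h1, -⟩ := h; omega

-- the `for city in missing:` loop of A, with the running `out` and `idx`
def pvFillA : List (Option Int) → Nat → List Int → List (Option Int)
  | out, _, [] => out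
  | out, idx, city :: rest =>
    let j := pvAdvance out idx
    if out.length ≤ j then out
    else pvFillA (out.set j (some city)) j rest

def repair_child_py (child : List (Option Int)) (fallback : List Int) : List Int :=
  let missing := fallback.filter (fun city => !(child.contains (some city)))
  let out := pvFillA child 1 missing
  -- fallback[0] raises IndexError when fallback = []; excluded by Pre_ (getD 0 is a dummy there)
  out.map (fun c => match c with | some v => v | none => (PySem.List.pyGet? fallback 0).getD 0)

-- ===== PORT B =====
-- the `for i, c in enumerate(child):` loop of B: i counter, remaining missing queue
def pvFillB : Nat → List (Option Int) → List Int → List (Option Int)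
  | _, [], _ => []
  | i, none :: t, m :: ms =>
    if i ≠ 0 then some m :: pvFillB (i + 1) t ms
    else none :: pvFillB (i + 1) t (m :: ms)
  | i, c :: t, ms => c :: pvFillB (i + 1) t ms

def repair_child_py_alt (child : List (Option Int)) (fallback : List Int) : List Int :=
  let missing := fallback.filter (fun city => !(child.contains (some city)))
  let out := pvFillB 0 child missing
  out.map (fun c => match c with | some v => v | none => (PySem.List.pyGet? fallback 0).getD 0)

-- ===== PRECONDITION & SPEC =====
-- Pre_ excludes exactly the inputs where Python A raises IndexError (fallback[0] with
-- fallback empty while a None city remains); Python B raises there too.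
def Pre_repair_child_py (child : List (Option Int)) (fallback : List Int) : Prop :=
  none ∈ child → fallback ≠ []
instance (child : List (Option Int)) (fallback : List Int) : Decidable (Pre_repair_child_py child fallback) := by unfold Pre_repair_child_py; infer_instance

def pvWitness_repair_child_py : List (Option Int) × List Int := ([some 0, none, some 2], [0, 1, 2])

def Spec_repair_child_py (child : List (Option Int)) (fallback : List Int) (out : List Int) : Prop := out = repair_child_py_alt child fallback
instance (child : List (Option Int)) (fallback : List Int) (out : List Int) : Decidable (Spec_repair_child_py child fallback out) := by unfold Spec_repair_child_py; infer_instance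

-- ===== CLAIM (what is proved, stated in full; the proofs are below) =====
def Claim_equal_repair_child_py : Prop := ∀ (child : List (Option Int)) (fallback : List Int), Dom_repair_child_py child fallback → Pre_repair_child_py child fallback → Spec_repair_child_py child fallback (repair_child_py child fallback)

-- ===== LEMMAS AND PROOFS =====

-- fill the empty slots of a suffix left-to-right from the queue `ms`
def fillQ : List (Option Int) → List Int → List (Option Int)
  | [], _ => []
  | none :: t, m :: ms => some m :: fillQ t ms
  | c :: t, ms => c :: fillQ t ms

theorem fillQ_nil (l : List (Option Int)) : fillQ l [] = l := by
  induction l with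
  | nil => rfl
  | cons c t ih => cases c <;> simp [fillQ, ih]

theorem pvAdvance_stop (out : List (Option Int)) (idx : Nat)
    (h : ¬ (idx < out.length ∧ out.getD idx none ≠ none)) : pvAdvance out idx = idx := by
  rw [pvAdvance, dif_neg h]

theorem pvAdvance_step (out : List (Option Int)) (idx : Nat)
    (h1 : idx < out.length) (h2 : out.getD idx none ≠ none) :
    pvAdvance out idx = pvAdvance out (idx + 1) := by
  conv_lhs => rw [pvAdvance, dif_pos ⟨h1, h2⟩]

theorem fillA_main (ms : List Int) :
    ∀ (out : List (Option Int)) (idx : Nat),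
      pvFillA out idx ms = out.take idx ++ fillQ (out.drop idx) ms := by
  induction ms with
  | nil =>
    intro out idx
    simp [pvFillA, fillQ_nil]
  | cons city rest ih =>
    -- inner induction on out.length - idx (fuel n)
    suffices h : ∀ (n : Nat) (out : List (Option Int)) (idx : Nat), out.length - idx ≤ n →
        pvFillA out idx (city :: rest) = out.take idx ++ fillQ (out.drop idx) (city :: rest) by
      intro out idx; exact h (out.length - idx) out idx le_rfl
    intro n
    induction n with
    | zero =>
      intro out idx hle
      have hge : out.length ≤ idx := by omega
      have hadv : pvAdvance out idx = idx := pvAdvance_stop out idx (by omega)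
      rw [pvFillA]
      simp [hadv, hge, List.drop_eq_nil_of_le hge, List.take_of_length_le hge, fillQ]
    | succ n ihn =>
      intro out idx hle
      by_cases hlt : idx < out.length
      · have hdrop : out.drop idx = out[idx] :: out.drop (idx + 1) :=
          List.drop_eq_getElem_cons hlt
        have hgd : out.getD idx none = out[idx] := List.getD_eq_getElem out none hlt
        cases hc : out[idx] with
        | some v =>
          -- skip a filled slot: advance steps, both sides peel one element
          have hne : out.getD idx none ≠ none := by rw [hgd, hc]; simp
          have hstep := pvAdvance_step out idx hlt hne
          have lhs_eq : pvFillA out idx (city :: rest) = pvFillA out (idx + 1) (city :: rest) := by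
            rw [pvFillA, pvFillA]; rw [hstep]
          rw [lhs_eq, ihn out (idx + 1) (by omega)]
          have htake : out.take (idx + 1) = out.take idx ++ [out[idx]] :=
            List.take_succ_eq_append_getElem hlt
          rw [htake, hdrop, hc]
          simp [fillQ]
        | none =>
          -- fill this slot with `city`
          have hadv : pvAdvance out idx = idx := by
            apply pvAdvance_stop; rw [hgd, hc]; simp
          have hnle : ¬ out.length ≤ idx := by omega
          rw [pvFillA]
          simp only [hadv, hnle]
          have hset : out.set idx (some city) = out.take idx ++ some city :: out.drop (idx + 1) := by
            rw [List.set_eq_take_append_cons_drop, if_pos hlt]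
          rw [ih (out.set idx (some city)) idx]
          rw [hset]
          have hlen : (out.take idx).length = idx := by
            simp [List.length_take, Nat.min_eq_left (Nat.le_of_lt hlt)]
          rw [List.take_append_of_le_length (by omega), List.drop_append_of_le_length (by omega)]
          simp [hlen, hdrop, hc, fillQ]
      · have hge : out.length ≤ idx := by omega
        have hadv : pvAdvance out idx = idx := pvAdvance_stop out idx (by omega)
        rw [pvFillA]
        simp [hadv, hge, List.drop_eq_nil_of_le hge, List.take_of_length_le hge, fillQ]

theorem fillB_pos : ∀ (t : List (Option Int)) (ms : List Int) (i : Nat), i ≠ 0 →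
    pvFillB i t ms = fillQ t ms := by
  intro t
  induction t with
  | nil => intro ms i _; rfl
  | cons c t iht =>
    intro ms i hi
    cases c with
    | none =>
      cases ms with
      | nil => simp [pvFillB, fillQ, iht [] (i + 1) (by omega)]
      | cons m ms' => simp [pvFillB, hi, fillQ, iht ms' (i + 1) (by omega)]
    | some v => simp [pvFillB, fillQ, iht ms (i + 1) (by omega)]

theorem fillB_zero (child : List (Option Int)) (ms : List Int) :
    pvFillB 0 child ms = child.take 1 ++ fillQ (child.drop 1) ms := by
  cases child with
  | nil => rfl
  | cons c t =>
    cases c with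
    | none =>
      cases ms with
      | nil => simp [pvFillB, fillB_pos t [] 1 (by omega)]
      | cons m ms' => simp [pvFillB, fillB_pos t (m :: ms') 1 (by omega)]
    | some v => simp [pvFillB, fillB_pos t ms 1 (by omega)]

theorem fill_eq (child : List (Option Int)) (ms : List Int) :
    pvFillA child 1 ms = pvFillB 0 child ms := by
  rw [fillA_main, fillB_zero]

-- ===== VERDICT (by name: the statement is the Claim_ definition above) =====
theorem repair_child_py_spec : Claim_equal_repair_child_py := by
  intro child fallback _ _
  unfold Spec_repair_child_py repair_child_py repair_child_py_alt
  simp only [fill_eq]
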